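-- pv_equiv track=rewrite | github.com/WenyueDai/Design_Cap_with_RF_MPNN_Chai | 5_Pipeline_r1_extenlen_25_40/step2_filter_s2_move.py | determine_glycine_caps
-- ===== SOURCE A (Python) =====
-- def determine_glycine_caps(sequence):
--     n_cap_len, c_cap_len = 0, 0
--     # Detect N cap (continuous glycine residues at the start)
--     for i, res in enumerate(sequence):
--         if res == 'G':
--             n_cap_len += 1
--         else:
--             break
--     # Detect C cap (continuous glycine residues at the end)
--     for i in range(len(sequence) - 1, -1, -1):
--         if sequence[i] == 'G':
--             c_cap_len += 1
--         else:
--             break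
--     return n_cap_len, c_cap_len
-- ===== SOURCE B (Python) =====
-- def determine_glycine_caps(sequence):
--     # Find positions of all non-glycine residues; the caps are determined by
--     # the first and last such positions (index arithmetic, no break-loops).
--     non_g = [i for i, res in enumerate(sequence) if res != 'G']
--     if not non_g:
--         return len(sequence), len(sequence)
--     return non_g[0], len(sequence) - 1 - non_g[-1]
-- ===== Notes on version B (the rewrite author's own statement) =====
-- stated objective: alternative
-- what changed: Instead of counting glycines with two break-loops from each end, B collects the indices of all non-glycine residues in one enumeration pass and derives both cap lengths by index arithmetic from the first and last such index (both equal len(sequence) when there is none).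
import Mathlib
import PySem

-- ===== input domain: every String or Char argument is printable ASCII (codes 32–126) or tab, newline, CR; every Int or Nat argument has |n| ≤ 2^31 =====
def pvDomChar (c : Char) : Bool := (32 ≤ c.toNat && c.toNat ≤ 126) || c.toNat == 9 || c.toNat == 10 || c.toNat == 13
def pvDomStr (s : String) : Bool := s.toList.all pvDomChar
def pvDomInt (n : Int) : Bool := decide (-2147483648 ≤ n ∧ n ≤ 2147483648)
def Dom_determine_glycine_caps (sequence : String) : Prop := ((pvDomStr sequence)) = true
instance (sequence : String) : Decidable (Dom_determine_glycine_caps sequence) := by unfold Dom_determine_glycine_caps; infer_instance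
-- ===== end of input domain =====

-- B derives both caps from the first and last non-glycine index found in one enumeration pass,
-- instead of A's two break-loops counting glycines from each end; objective: alternative.

-- ===== PORT A =====
-- A's forward loop: count 'G' from the head, break at the first non-'G'.
def pvCapCount : List Char → Int
  | [] => 0
  | c :: cs => if c = 'G' then 1 + pvCapCount cs else 0

-- the backward loop scans indices len-1 … 0 with the same break logic, i.e. the forward loop on the reversed list
def determine_glycine_caps (sequence : String) : Int × Int :=
  (pvCapCount sequence.toList, pvCapCount sequence.toList.reverse)

-- ===== PORT B =====
def determine_glycine_caps_alt (sequence : String) : Int × Int :=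
  let l := sequence.toList
  let nonG := ((PySem.List.enumerate l 0).filter (fun p => p.2 != 'G')).map (·.1)
  match nonG.head?, nonG.getLast? with
  | some i, some j => (i, (l.length : Int) - 1 - j)
  | _, _ => ((l.length : Int), (l.length : Int))

-- ===== PRECONDITION & SPEC =====
def Spec_determine_glycine_caps (sequence : String) (out : Int × Int) : Prop := out = determine_glycine_caps_alt sequence
instance (sequence : String) (out : Int × Int) : Decidable (Spec_determine_glycine_caps sequence out) := by unfold Spec_determine_glycine_caps; infer_instance

-- ===== CLAIM (what is proved, stated in full; the proofs are below) =====
def Claim_equal_determine_glycine_caps : Prop := ∀ (sequence : String), Dom_determine_glycine_caps sequence → Spec_determine_glycine_caps sequence (determine_glycine_caps sequence)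

-- ===== LEMMAS AND PROOFS =====
-- the non-glycine index list B builds, with an arbitrary enumeration start for the inductions
def pvNonG (l : List Char) (s : Int) : List Int :=
  ((PySem.List.enumerate l s).filter (fun p => p.2 != 'G')).map (·.1)

theorem pvNonG_nil (s : Int) : pvNonG [] s = [] := by
  simp [pvNonG, PySem.List.enumerate_nil]

theorem pvNonG_cons (c : Char) (cs : List Char) (s : Int) :
    pvNonG (c :: cs) s = if c = 'G' then pvNonG cs (s + 1) else s :: pvNonG cs (s + 1) := by
  by_cases h : c = 'G' <;> simp [pvNonG, PySem.List.enumerate_cons, h]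

theorem pvNonG_append_singleton (xs : List Char) (x : Char) (s : Int) :
    pvNonG (xs ++ [x]) s =
      pvNonG xs s ++ (if x = 'G' then [] else [s + xs.length]) := by
  by_cases h : x = 'G' <;>
    simp [pvNonG, PySem.List.enumerate_append, PySem.List.enumerate_cons,
      PySem.List.enumerate_nil, h]

-- A's head count is the first non-glycine index (shifted by the start), or the length
theorem pvCapCount_head (l : List Char) (s : Int) :
    pvCapCount l = (match (pvNonG l s).head? with
      | some i => i - s
      | none => (l.length : Int)) := by
  induction l generalizing s with
  | nil => simp [pvCapCount, pvNonG_nil]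
  | cons c cs ih =>
    by_cases h : c = 'G'
    · rw [pvNonG_cons, if_pos h]
      rcases h' : (pvNonG cs (s + 1)).head? with _ | i <;>
        simp [pvCapCount, h, ih (s + 1), h'] <;> ring
    · simp [pvCapCount, h, pvNonG_cons]

-- A's tail count is determined by the last non-glycine index, or the length
theorem pvCapCount_last (l : List Char) (s : Int) :
    pvCapCount l.reverse = (match (pvNonG l s).getLast? with
      | some j => s + (l.length : Int) - 1 - j
      | none => (l.length : Int)) := by
  induction l using List.reverseRecOn with
  | nil => simp [pvCapCount, pvNonG_nil]
  | append_singleton xs x ih =>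
    rw [pvNonG_append_singleton]
    by_cases h : x = 'G'
    · rw [if_pos h, List.append_nil]
      rcases h' : (pvNonG xs s).getLast? with _ | j <;>
        simp [List.reverse_append, pvCapCount, h, ih, h'] <;> ring
    · rw [if_neg h]
      simp [List.reverse_append, pvCapCount, h, List.getLast?_append]
      ring

-- ===== VERDICT (by name: the statement is the Claim_ definition above) =====
theorem determine_glycine_caps_spec : Claim_equal_determine_glycine_caps := by
  intro seq _
  unfold Spec_determine_glycine_caps determine_glycine_caps determine_glycine_caps_alt
  show _ = (match (pvNonG seq.toList 0).head?, (pvNonG seq.toList 0).getLast? with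
    | some i, some j => (i, (seq.toList.length : Int) - 1 - j)
    | _, _ => ((seq.toList.length : Int), (seq.toList.length : Int)))
  rw [pvCapCount_head seq.toList 0, pvCapCount_last seq.toList 0]
  rcases hng : pvNonG seq.toList 0 with _ | ⟨a, rest⟩
  · simp
  · have h2 := List.getLast?_eq_some_getLast (l := a :: rest) (by simp)
    simp [h2]
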